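-- pv_equiv track=rewrite | github.com/AlexBuccheri/python | Modules/electronic_structure/structure/supercell.py | list_global_atom_indices_per_cells
-- ===== SOURCE A (Python) =====
-- def list_global_atom_indices_per_cells(unit_cell, translations):
--     cells = []
--     iatom = 0
--     for translation in translations:
--         cell = []
--         for atom in unit_cell:
--             cell.append(iatom)
--             iatom += 1
--         cells.append(cell)
--
--     return cells
-- ===== SOURCE B (Python) =====
-- def list_global_atom_indices_per_cells(unit_cell, translations):
--     n_atoms = len(unit_cell)
--     return [list(range(t * n_atoms, (t + 1) * n_atoms))
--             for t, _ in enumerate(translations)]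
-- ===== Notes on version B (the rewrite author's own statement) =====
-- stated objective: simpler
-- what changed: Replaces the threaded iatom counter and inner per-atom append loop with closed-form arithmetic: each cell t is range(t*n, (t+1)*n) built directly.
import Mathlib
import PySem

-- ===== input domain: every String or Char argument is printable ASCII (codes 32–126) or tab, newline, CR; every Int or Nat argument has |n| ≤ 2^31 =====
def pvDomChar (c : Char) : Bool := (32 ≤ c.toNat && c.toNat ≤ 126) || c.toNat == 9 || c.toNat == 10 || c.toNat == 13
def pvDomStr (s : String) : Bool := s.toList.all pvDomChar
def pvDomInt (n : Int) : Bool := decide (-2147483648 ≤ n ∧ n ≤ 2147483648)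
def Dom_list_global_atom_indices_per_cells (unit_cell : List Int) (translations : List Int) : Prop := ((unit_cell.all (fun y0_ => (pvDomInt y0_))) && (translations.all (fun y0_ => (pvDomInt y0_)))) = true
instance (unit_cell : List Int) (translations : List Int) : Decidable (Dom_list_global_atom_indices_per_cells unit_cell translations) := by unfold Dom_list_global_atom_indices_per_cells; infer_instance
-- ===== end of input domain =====

-- B replaces A's running iatom counter and inner append loop with closed-form per-cell range blocks (simpler decomposition).


-- ===== PORT A =====
-- Literal port of A: fold over translations threading (cells, iatom); inner fold appends iatom per atom.
def list_global_atom_indices_per_cells (unit_cell : List Int) (translations : List Int) : List (List Int) :=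
  (translations.foldl
    (fun (st : List (List Int) × Int) _ =>
      let cell := unit_cell.foldl (fun (c : List Int × Int) _ => (c.1 ++ [c.2], c.2 + 1)) ([], st.2)
      (st.1 ++ [cell.1], cell.2))
    ([], 0)).1

-- ===== PORT B =====
-- Port of B: each cell is the closed-form range block [t*n, (t+1)*n).
def list_global_atom_indices_per_cells_alt (unit_cell : List Int) (translations : List Int) : List (List Int) :=
  let n : Int := unit_cell.length
  (PySem.List.enumerate translations).map (fun te => PySem.List.pyRange (te.1 * n) ((te.1 + 1) * n) 1)

-- ===== PRECONDITION & SPEC =====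
def Spec_list_global_atom_indices_per_cells (unit_cell : List Int) (translations : List Int) (out : List (List Int)) : Prop := out = list_global_atom_indices_per_cells_alt unit_cell translations
instance (unit_cell : List Int) (translations : List Int) (out : List (List Int)) : Decidable (Spec_list_global_atom_indices_per_cells unit_cell translations out) := by unfold Spec_list_global_atom_indices_per_cells; infer_instance

-- ===== CLAIM (what is proved, stated in full; the proofs are below) =====
def Claim_equal_list_global_atom_indices_per_cells : Prop := ∀ (unit_cell : List Int) (translations : List Int), Dom_list_global_atom_indices_per_cells unit_cell translations → Spec_list_global_atom_indices_per_cells unit_cell translations (list_global_atom_indices_per_cells unit_cell translations)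

-- ===== LEMMAS AND PROOFS =====

-- ===== VERDICT (by name: the statement is the Claim_ definition above) =====
-- Inner loop of A builds the contiguous block starting at k.
theorem pv_inner (unit_cell : List Int) (c : List Int) (k : Int) :
    unit_cell.foldl (fun (c : List Int × Int) _ => (c.1 ++ [c.2], c.2 + 1)) (c, k)
      = (c ++ PySem.List.pyRange k (k + unit_cell.length) 1, k + unit_cell.length) := by
  induction unit_cell generalizing c k with
  | nil => simp [PySem.List.pyRange_one_eq_nil le_rfl]
  | cons x xs ih =>
    simp only [List.foldl_cons, ih]
    have h2 : k + ((x :: xs).length : Int) = k + 1 + xs.length := by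
      simp only [List.length_cons]; push_cast; ring
    rw [h2, PySem.List.pyRange_one_cons (a := k) (b := k + 1 + (xs.length : Int)) (by omega)]
    simp

-- Outer loop of A after the inner loop is replaced by its block value.
theorem pv_outer_aux (n : Int) (translations : List Int) (acc : List (List Int)) (t : Int) :
    (translations.foldl
      (fun (st : List (List Int) × Int) _ =>
        (st.1 ++ [PySem.List.pyRange st.2 (st.2 + n) 1], st.2 + n))
      (acc, t * n)).1
    = acc ++ (PySem.List.enumerate translations t).map
        (fun te => PySem.List.pyRange (te.1 * n) ((te.1 + 1) * n) 1) := by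
  induction translations generalizing acc t with
  | nil => simp [PySem.List.enumerate_nil]
  | cons x xs ih =>
    rw [List.foldl_cons, show t * n + n = (t + 1) * n from by ring]
    rw [ih, PySem.List.enumerate_cons]
    simp

theorem list_global_atom_indices_per_cells_spec : Claim_equal_list_global_atom_indices_per_cells := by
  intro unit_cell translations _
  unfold Spec_list_global_atom_indices_per_cells list_global_atom_indices_per_cells
    list_global_atom_indices_per_cells_alt
  have h := pv_outer_aux unit_cell.length translations [] 0
  simp only [zero_mul, List.nil_append] at h
  simp only [pv_inner, List.nil_append]
  exact h
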